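-- pv_equiv track=rewrite | github.com/sebastien/tahchee | Sources/tahchee/plugins/_kiwi/kiwi2html.py | formatSectionNumber
-- ===== SOURCE A (Python) =====
-- def formatSectionNumber(number):
-- 	number = str(number).split(".")
-- 	depth = 0
-- 	res   = []
-- 	for n in number:
-- 		if depth == len(number) - 1:
-- 			res.append('<span class="level%s">%s<span class="lastDot dot">.</span></span>' % (depth,n))
-- 		else:
-- 			res.append('<span class="level%s">%s<span class="dot">.</span></span>' % (depth,n))
-- 		depth += 1
-- 	return "".join(res)
-- ===== SOURCE B (Python) =====
-- def formatSectionNumber(number):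
-- 	def go(s, depth):
-- 		head, sep, rest = s.partition(".")
-- 		if sep:
-- 			return '<span class="level%s">%s<span class="dot">.</span></span>' % (depth, head) + go(rest, depth + 1)
-- 		return '<span class="level%s">%s<span class="lastDot dot">.</span></span>' % (depth, head)
-- 	return go(str(number), 0)
-- ===== Notes on version B (the rewrite author's own statement) =====
-- stated objective: alternative
-- what changed: B never splits the string into a list or computes its length: it recursively peels the head component with str.partition at the dot separator, emitting a plain-dot span and recursing on the remainder, with the no-separator case as the base case emitting the lastDot span.
import Mathlib
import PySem

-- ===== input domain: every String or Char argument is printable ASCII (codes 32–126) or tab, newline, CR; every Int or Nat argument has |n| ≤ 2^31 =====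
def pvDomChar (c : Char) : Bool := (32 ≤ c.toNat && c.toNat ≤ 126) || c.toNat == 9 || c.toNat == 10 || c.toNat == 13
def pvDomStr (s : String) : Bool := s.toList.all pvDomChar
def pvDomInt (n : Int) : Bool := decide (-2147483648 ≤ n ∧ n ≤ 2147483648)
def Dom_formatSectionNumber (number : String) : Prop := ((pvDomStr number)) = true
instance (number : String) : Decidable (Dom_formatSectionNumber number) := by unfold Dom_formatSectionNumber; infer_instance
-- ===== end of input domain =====

-- B is a different decomposition: instead of splitting the string and branching on depth==len-1
-- inside a loop, it recursively peels the head component with partition('.'), the no-separator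
-- case being the lastDot base case ("alternative"; same output, same O(n) cost).


-- ===== PORT A =====
-- the two format strings shared by both Pythons; depth is a Python int (Int), printed via str()
def pvSpanDot (d : Int) (n : String) : String :=
  "<span class=\"level" ++ PySem.Int.toStr d ++ "\">" ++ n ++ "<span class=\"dot\">.</span></span>"
def pvSpanLastDot (d : Int) (n : String) : String :=
  "<span class=\"level" ++ PySem.Int.toStr d ++ "\">" ++ n ++ "<span class=\"lastDot dot\">.</span></span>"

def formatSectionNumber (number : String) : String :=
  -- number = str(number).split(".")   ('.' is a nonempty separator, so split? is always some)
  let parts := (PySem.Str.split? number ".").getD [""]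
  -- depth = 0; res = []; for n in number: … ; depth += 1
  let st := parts.foldl (fun (st : Int × List String) n =>
      if st.1 == (parts.length : Int) - 1 then
        (st.1 + 1, st.2 ++ [pvSpanLastDot st.1 n])
      else
        (st.1 + 1, st.2 ++ [pvSpanDot st.1 n]))
    ((0 : Int), ([] : List String))
  -- return "".join(res)
  PySem.Str.join "" st.2

-- ===== PORT B =====
-- head, sep, rest = s.partition("."): scan for the first '.'; none = no separator found
def pvPartDot : List Char → List Char × Option (List Char)
  | [] => ([], none)
  | c :: rest =>
      if c = '.' then ([], some rest)
      else
        let p := pvPartDot rest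
        (c :: p.1, p.2)

theorem pvPartDot_rest_lt (s h r : List Char) (hp : pvPartDot s = (h, some r)) :
    r.length < s.length := by
  induction s generalizing h r with
  | nil => simp [pvPartDot] at hp
  | cons c rest ih =>
      by_cases hc : c = '.'
      · simp [pvPartDot, hc] at hp
        simp [hp.2]
      · simp [pvPartDot, hc] at hp
        rcases hq : (pvPartDot rest).2 with _ | r'
        · rw [hq] at hp; exact absurd hp.2 (by simp)
        · rw [hq] at hp
          have := ih (pvPartDot rest).1 r' (by rw [← hq])
          simp at hp
          simp [← hp.2] at this ⊢
          omega

-- def go(s, depth): head, sep, rest = s.partition('.'); if sep: span + go(rest, depth+1)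
--                   else: lastDot span
def pvGoB (s : List Char) (d : Int) : String :=
  match hp : pvPartDot s with
  | (head, some rest) => pvSpanDot d (String.ofList head) ++ pvGoB rest (d + 1)
  | (head, none) => pvSpanLastDot d (String.ofList head)
termination_by s.length
decreasing_by exact pvPartDot_rest_lt s head rest hp

def formatSectionNumber_alt (number : String) : String :=
  -- return go(str(number), 0)
  pvGoB number.toList 0

-- ===== PRECONDITION & SPEC =====
def Spec_formatSectionNumber (number : String) (out : String) : Prop := out = formatSectionNumber_alt number
instance (number : String) (out : String) : Decidable (Spec_formatSectionNumber number out) := by unfold Spec_formatSectionNumber; infer_instance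

-- ===== CLAIM =====
def Claim_equal_formatSectionNumber : Prop := ∀ (number : String), Dom_formatSectionNumber number → Spec_formatSectionNumber number (formatSectionNumber number)

-- ===== LEMMAS AND PROOFS =====

-- structural split on '.', the common reference point of both proofs
def mySplit : List Char → List (List Char)
  | [] => [[]]
  | c :: rest =>
      if c = '.' then [] :: mySplit rest
      else
        match mySplit rest with
        | [] => [[c]]  -- unreachable
        | h :: t => (c :: h) :: t

theorem mySplit_ne_nil (s : List Char) : mySplit s ≠ [] := by
  induction s with
  | nil => simp [mySplit]
  | cons c rest ih =>
      by_cases hc : c = '.'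
      · simp [mySplit, hc]
      · rcases h : mySplit rest with _ | ⟨h1, t⟩
        · exact absurd h ih
        · simp [mySplit, hc, h]

-- the fuel-based splitOn loop computes mySplit
theorem go_eq_mySplit (fuel : Nat) :
    ∀ (l cur : List Char) (acc : List (List Char)), l.length < fuel →
      PySem.Chars.splitOn.go ['.'] fuel l cur acc
        = acc.reverse ++ (mySplit l).modifyHead (cur.reverse ++ ·) := by
  induction fuel with
  | zero => intro l cur acc h; omega
  | succ fuel ih =>
      intro l cur acc h
      cases l with
      | nil => simp [PySem.Chars.splitOn.go, mySplit]
      | cons c rest =>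
          simp only [PySem.Chars.splitOn.go]
          by_cases hc : c = '.'
          · rw [if_pos (by simp [List.isPrefixOf, hc])]
            rw [show List.drop (['.'].length) (c :: rest) = rest from rfl]
            rw [ih rest [] (cur.reverse :: acc) (by simp at h ⊢; omega)]
            simp only [mySplit, if_pos hc]
            rcases hm : mySplit rest with _ | ⟨h1, t⟩
            · exact absurd hm (mySplit_ne_nil rest)
            · simp only [List.modifyHead, List.reverse_cons, List.reverse_nil,
                List.nil_append, List.append_nil, List.append_assoc, List.cons_append]
          · rw [if_neg (by simp [List.isPrefixOf, (Ne.symm hc : ¬ '.' = c)])]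
            rw [ih rest (c :: cur) acc (by simp at h ⊢; omega)]
            rcases hm : mySplit rest with _ | ⟨h1, t⟩
            · exact absurd hm (mySplit_ne_nil rest)
            · simp only [mySplit, if_neg hc, hm]
              simp only [List.modifyHead, List.reverse_cons, List.append_assoc,
                List.cons_append, List.nil_append]

theorem splitOn_eq_mySplit (s : List Char) :
    PySem.Chars.splitOn s ['.'] = mySplit s := by
  rw [PySem.Chars.splitOn.eq_1, go_eq_mySplit (s.length + 1) s [] [] (by omega)]
  rcases hm : mySplit s with _ | ⟨h1, t⟩
  · exact absurd hm (mySplit_ne_nil s)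
  · simp

-- "".join distributes over appending one more piece
theorem join_empty_append_singleton (xs : List String) (y : String) :
    PySem.Str.join "" (xs ++ [y]) = PySem.Str.join "" xs ++ y := by
  apply String.toList_inj.mp
  rw [String.toList_append, PySem.Str.toList_join, PySem.Str.toList_join]
  induction xs with
  | nil => simp [PySem.Chars.join_nil, PySem.Chars.join_singleton]
  | cons x xs ih =>
      cases xs with
      | nil =>
          simp [PySem.Chars.join_singleton, PySem.Chars.join_cons_cons]
      | cons z zs =>
          simp only [List.cons_append, List.map_cons] at *
          rw [PySem.Chars.join_cons_cons, PySem.Chars.join_cons_cons, ih]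
          simp

-- the common rendering of a nonempty part list starting at depth d
def renderS : List String → Int → String
  | [], _ => ""
  | [x], d => pvSpanLastDot d x
  | x :: y :: t, d => pvSpanDot d x ++ renderS (y :: t) (d + 1)

-- A's loop, characterised as renderS
theorem foldA_eq_renderS (N : Nat) :
    ∀ (l : List String) (d : Int) (acc : List String), l ≠ [] →
      d + l.length = (N : Int) →
      PySem.Str.join ""
        (l.foldl (fun (st : Int × List String) n =>
          if st.1 == (N : Int) - 1 then
            (st.1 + 1, st.2 ++ [pvSpanLastDot st.1 n])
          else
            (st.1 + 1, st.2 ++ [pvSpanDot st.1 n])) (d, acc)).2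
        = PySem.Str.join "" acc ++ renderS l d := by
  intro l
  induction l with
  | nil => intro d acc hne; exact absurd rfl hne
  | cons x xs ih =>
      intro d acc hne hlen
      cases xs with
      | nil =>
          have hd : d = (N : Int) - 1 := by simp at hlen; omega
          simp only [List.foldl_cons, hd, beq_self_eq_true, if_pos, List.foldl_nil]
          rw [join_empty_append_singleton]
          rfl
      | cons z zs =>
          have hd : ¬ ((d == (N : Int) - 1) = true) := by
            simp only [List.length_cons] at hlen
            simp only [beq_iff_eq]; push_cast at hlen; omega
          rw [List.foldl_cons, if_neg hd]
          rw [ih (d + 1) (acc ++ [pvSpanDot d x]) (by simp)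
            (by simp only [List.length_cons] at hlen ⊢; push_cast at hlen ⊢; omega)]
          rw [join_empty_append_singleton, renderS]
          rw [String.append_assoc]

-- mySplit in terms of pvPartDot (the two decompositions agree step-for-step)
theorem mySplit_partDot (s : List Char) :
    mySplit s = match pvPartDot s with
      | (h, none) => [h]
      | (h, some r) => h :: mySplit r := by
  induction s with
  | nil => simp [mySplit, pvPartDot]
  | cons c rest ih =>
      by_cases hc : c = '.'
      · simp [mySplit, pvPartDot, hc]
      · rcases hp : pvPartDot rest with ⟨h, _ | r⟩
        · simp only [mySplit, pvPartDot, if_neg hc, hp] at *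
          simp [ih]
        · simp only [mySplit, pvPartDot, if_neg hc, hp] at *
          rcases hm : mySplit rest with _ | ⟨h1, t⟩
          · exact absurd hm (mySplit_ne_nil rest)
          · rw [hm] at ih; simp at ih
            simp [ih.1, ih.2]

-- B's recursion computes renderS of mySplit
theorem goB_eq_renderS (n : Nat) : ∀ (s : List Char), s.length ≤ n → ∀ (d : Int),
    pvGoB s d = renderS ((mySplit s).map String.ofList) d := by
  induction n with
  | zero =>
      intro s hs d
      have : s = [] := List.eq_nil_of_length_eq_zero (by omega)
      subst this
      simp [pvGoB, pvPartDot, mySplit, renderS]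
  | succ n ih =>
      intro s hs d
      rw [pvGoB]
      split
      · rename_i head rest heq
        have hlt := pvPartDot_rest_lt s head rest heq
        have hms : mySplit s = head :: mySplit rest := by
          rw [mySplit_partDot s, heq]
        rw [hms, List.map_cons, ih rest (by omega) (d + 1)]
        rcases hm : mySplit rest with _ | ⟨h1, t⟩
        · exact absurd hm (mySplit_ne_nil rest)
        · rfl
      · rename_i head heq
        have hms : mySplit s = [head] := by
          rw [mySplit_partDot s, heq]
        rw [hms]
        rfl

theorem formatSectionNumber_eq_alt (number : String) :
    formatSectionNumber number = formatSectionNumber_alt number := by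
  simp only [formatSectionNumber, formatSectionNumber_alt]
  have hsplit : (PySem.Str.split? number ".").getD [""]
      = (mySplit number.toList).map String.ofList := by
    rw [PySem.Str.split?.eq_1, PySem.Chars.split?.eq_1,
      if_neg (by decide : ¬((".".toList).isEmpty = true))]
    simp only [Option.map_some, Option.getD_some]
    rw [show (".".toList) = ['.'] from rfl, splitOn_eq_mySplit]
  rw [hsplit]
  have hne : (mySplit number.toList).map String.ofList ≠ [] := by
    simp [mySplit_ne_nil]
  rw [foldA_eq_renderS (((mySplit number.toList).map String.ofList).length) _ 0 [] hne (by simp)]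
  rw [goB_eq_renderS number.toList.length number.toList (le_refl _) 0]
  rfl

-- ===== VERDICT =====
theorem formatSectionNumber_spec : Claim_equal_formatSectionNumber := by
  intro number _
  exact formatSectionNumber_eq_alt number
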